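-- pv_equiv track=rewrite | github.com/iproha94/contests | codeforces/1146/b.py | _f
-- ===== SOURCE A (Python) =====
-- def _f(s):
--     new_s = ""
--     last_a_index = -1
--     last_a_index_in_new_s = -1
--     for i, c in enumerate(s):
--         if c == 'a':
--             last_a_index = i
--             last_a_index_in_new_s = len(new_s)
--         else:
--             new_s += c
--
--     if new_s == "":
--         return s
--
--     if last_a_index == -1:
--         if s[len(s) // 2:] == s[:len(s) // 2]:
--             return s[:len(s) // 2]
--         else:
--             return ':('
--
--     last_a_index_in_new_s_save = last_a_index_in_new_s
--     while last_a_index_in_new_s < len(new_s):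
--         if new_s[:last_a_index_in_new_s] == new_s[last_a_index_in_new_s:]:
--             return s[:last_a_index + (last_a_index_in_new_s - last_a_index_in_new_s_save + 1)]
--         last_a_index_in_new_s += 1
--     return ':('
-- ===== SOURCE B (Python) =====
-- def _f(s):
--     new_s = ''.join(c for c in s if c != 'a')
--     if new_s == "":
--         return s
--     n = len(new_s)
--     if n % 2 == 1:
--         return ':('
--     h = n // 2
--     if 'a' in s[len(s) - h:]:
--         return ':('
--     if new_s[:h] != new_s[h:]:
--         return ':('
--     return s[:len(s) - h]
-- ===== Notes on version B (the rewrite author's own statement) =====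
-- stated objective: faster
-- what changed: Instead of scanning candidate split points k upward from the position of the last removed letter and slicing/comparing the two parts of new_s at each step (each slice copies, giving quadratic work), B uses the fact that only k = len(new_s)//2 can split new_s into two equal halves: one parity check, one check that the suffix of s of that length contains no removed letter, and one half comparison, all linear.
import Mathlib
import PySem

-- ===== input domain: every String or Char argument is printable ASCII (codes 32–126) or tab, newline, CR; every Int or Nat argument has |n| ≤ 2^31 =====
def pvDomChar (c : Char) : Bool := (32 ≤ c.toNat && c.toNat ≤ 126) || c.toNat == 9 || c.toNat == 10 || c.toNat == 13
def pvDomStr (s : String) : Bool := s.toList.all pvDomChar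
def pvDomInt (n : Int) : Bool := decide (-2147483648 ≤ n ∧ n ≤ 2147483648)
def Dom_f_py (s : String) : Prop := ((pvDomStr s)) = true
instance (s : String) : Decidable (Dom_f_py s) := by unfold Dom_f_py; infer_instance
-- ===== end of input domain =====

-- B replaces A's quadratic scan over candidate split points by the single O(n) check at k = len(new_s)//2.

-- ===== PORT A =====
-- the body of A's 'for i, c in enumerate(s)' loop
def stepA (st : List Char × Int × Int) (ic : Int × Char) : List Char × Int × Int :=
  if ic.2 = 'a' then (st.1, ic.1, (st.1.length : Int))
  else (st.1 ++ [ic.2], st.2.1, st.2.2)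

-- A's 'while last_a_index_in_new_s < len(new_s)' loop (k is the running last_a_index_in_new_s)
def aLoop (ns cs : List Char) (la save : Int) (k : Int) : String :=
  if _h : k < (ns.length : Int) then
    if PySem.List.slice ns none (some k) = PySem.List.slice ns (some k) none then
      String.ofList (PySem.List.slice cs none (some (la + (k - save + 1))))
    else aLoop ns cs la save (k + 1)
  else ":("
termination_by ((ns.length : Int) - k).toNat
decreasing_by omega

def f_py (s : String) : String :=
  let cs := s.toList
  let st := (PySem.List.enumerate cs 0).foldl stepA ([], -1, -1)
  if st.1 = [] then s
  else if st.2.1 = -1 then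
    let m := PySem.Int.floordiv (cs.length : Int) 2
    if PySem.List.slice cs (some m) none = PySem.List.slice cs none (some m) then
      String.ofList (PySem.List.slice cs none (some m))
    else ":("
  else aLoop st.1 cs st.2.1 st.2.2 st.2.2

-- ===== PORT B =====
def f_py_alt (s : String) : String :=
  let cs := s.toList
  let ns := cs.filter (fun c => c != 'a')
  if ns = [] then s
  else if PySem.Int.mod (ns.length : Int) 2 = 1 then ":("
  else
    let h := PySem.Int.floordiv (ns.length : Int) 2
    if PySem.Chars.isIn ['a'] (PySem.List.slice cs (some ((cs.length : Int) - h)) none) then ":("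
    else if ¬ (PySem.List.slice ns none (some h) = PySem.List.slice ns (some h) none) then ":("
    else String.ofList (PySem.List.slice cs none (some ((cs.length : Int) - h)))

-- ===== PRECONDITION & SPEC =====
def Spec_f_py (s : String) (out : String) : Prop := out = f_py_alt s
instance (s : String) (out : String) : Decidable (Spec_f_py s out) := by unfold Spec_f_py; infer_instance

-- ===== CLAIM (what is proved, stated in full; the proofs are below) =====
def Claim_equal_f_py : Prop := ∀ (s : String), Dom_f_py s → Spec_f_py s (f_py s)

-- ===== LEMMAS AND PROOFS =====

-- A's for-loop over a segment with no 'a': it only appends the characters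
theorem foldA_no_a (l : List Char) (h : 'a' ∉ l) :
    ∀ (st : List Char × Int × Int) (i : Int),
      (PySem.List.enumerate l i).foldl stepA st = (st.1 ++ l, st.2.1, st.2.2) := by
  induction l with
  | nil => intro st i; simp [PySem.List.enumerate_nil]
  | cons c t ih =>
    intro st i
    have hc : c ≠ 'a' := fun hc => h (by simp [hc])
    rw [PySem.List.enumerate_cons]
    simp only [List.foldl_cons, stepA, if_neg hc]
    rw [ih (fun ht => h (List.mem_cons_of_mem _ ht))]
    simp

-- first component of A's for-loop state: the 'a'-filtered characters get appended
theorem foldA_fst (l : List Char) :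
    ∀ (st : List Char × Int × Int) (i : Int),
      ((PySem.List.enumerate l i).foldl stepA st).1 = st.1 ++ l.filter (fun c => c != 'a') := by
  induction l with
  | nil => intro st i; simp [PySem.List.enumerate_nil]
  | cons c t ih =>
    intro st i
    rw [PySem.List.enumerate_cons]
    simp only [List.foldl_cons, stepA]
    by_cases hc : c = 'a'
    · simp only [if_pos hc, ih]
      simp [hc]
    · simp only [if_neg hc, ih]
      simp [hc]

-- last-occurrence decomposition
theorem exists_last_a (l : List Char) (h : 'a' ∈ l) :
    ∃ p t, l = p ++ 'a' :: t ∧ 'a' ∉ t := by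
  induction l using List.reverseRecOn with
  | nil => simp at h
  | append_singleton l c ih =>
    by_cases hc : c = 'a'
    · exact ⟨l, [], by simp [hc], by simp⟩
    · have hl : 'a' ∈ l := by
        rcases List.mem_append.1 h with h1 | h1
        · exact h1
        · simp at h1; exact absurd h1.symm hc
      obtain ⟨p, t, hpt, hna⟩ := ih hl
      exact ⟨p, t ++ [c], by simp [hpt], by
        intro hm
        rcases List.mem_append.1 hm with h1 | h1
        · exact hna h1
        · simp at h1; exact hc h1.symm⟩

-- the while loop of A, characterised: it can only succeed at k = len(ns)/2
theorem aLoop_eq (ns cs : List Char) (la save : Int) (k : Int) (hk : 0 ≤ k) (hne : ns ≠ []) :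
    aLoop ns cs la save k =
      if ns.length % 2 = 0 ∧ k ≤ ((ns.length / 2 : Nat) : Int)
          ∧ ns.take (ns.length / 2) = ns.drop (ns.length / 2) then
        String.ofList (PySem.List.slice cs none (some (la + (((ns.length / 2 : Nat) : Int) - save + 1))))
      else ":(" := by
  have hlen : ns.length ≠ 0 := by simpa using hne
  suffices H : ∀ (fuel : Nat) (k : Int), ((ns.length : Int) - k).toNat ≤ fuel → 0 ≤ k →
      aLoop ns cs la save k =
        if ns.length % 2 = 0 ∧ k ≤ ((ns.length / 2 : Nat) : Int)
            ∧ ns.take (ns.length / 2) = ns.drop (ns.length / 2) then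
          String.ofList (PySem.List.slice cs none (some (la + (((ns.length / 2 : Nat) : Int) - save + 1))))
        else ":(" by
    exact H _ k le_rfl hk
  intro fuel
  induction fuel with
  | zero =>
    intro k hf hk0
    have hkn : ¬ k < (ns.length : Int) := by omega
    rw [aLoop, dif_neg hkn, if_neg]
    rintro ⟨-, h2, -⟩
    have : ns.length / 2 < ns.length := Nat.div_lt_self (by omega) (by omega)
    omega
  | succ f ih =>
    intro k hf hk0
    rw [aLoop]
    by_cases hkn : k < (ns.length : Int)
    · rw [dif_pos hkn, PySem.List.slice_to _ hk0, PySem.List.slice_from _ hk0]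
      by_cases heq : ns.take k.toNat = ns.drop k.toNat
      · have hl1 : (ns.take k.toNat).length = k.toNat := by
          simp [List.length_take]; omega
        have hl2 : (ns.drop k.toNat).length = ns.length - k.toNat := by simp
        have h2k : 2 * k.toNat = ns.length := by
          have := congrArg List.length heq; omega
        have hhalf : ns.length / 2 = k.toNat := by omega
        have hmod : ns.length % 2 = 0 := by omega
        rw [if_pos heq, if_pos]
        · have harg : la + (k - save + 1) = la + (((ns.length / 2 : Nat) : Int) - save + 1) := by
            omega
          rw [harg]
        · exact ⟨hmod, by omega, by rw [hhalf]; exact heq⟩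
      · rw [if_neg heq, ih (k + 1) (by omega) (by omega)]
        apply if_congr _ rfl rfl
        constructor
        · rintro ⟨h1, h2, h3⟩
          exact ⟨h1, by omega, h3⟩
        · rintro ⟨h1, h2, h3⟩
          refine ⟨h1, ?_, h3⟩
          rcases lt_or_eq_of_le h2 with hlt | hek
          · omega
          · exfalso
            apply heq
            have hkh : k.toNat = ns.length / 2 := by omega
            rw [hkh]; exact h3
    · rw [dif_neg hkn, if_neg]
      rintro ⟨-, h2, -⟩
      have : ns.length / 2 < ns.length := Nat.div_lt_self (by omega) (by omega)
      omega

-- "a" is not in the tail t of the last-a decomposition, etc.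
theorem filter_eq_self_of_no_a (l : List Char) (h : 'a' ∉ l) :
    l.filter (fun c => c != 'a') = l :=
  List.filter_eq_self.mpr (fun c hc => by
    simp only [bne_iff_ne, ne_eq]
    rintro rfl
    exact h hc)

theorem f_py_spec : Claim_equal_f_py := by
  intro s _
  unfold Spec_f_py
  by_cases ha : 'a' ∈ s.toList
  case neg =>
    have hfold := foldA_no_a s.toList ha ([], -1, -1) 0
    have hfilt := filter_eq_self_of_no_a s.toList ha
    have hm : PySem.Int.floordiv (s.toList.length : Int) 2 = ((s.toList.length / 2 : Nat) : Int) := by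
      exact_mod_cast PySem.Int.floordiv_natCast s.toList.length 2
    have hmod : PySem.Int.mod (s.toList.length : Int) 2 = ((s.toList.length % 2 : Nat) : Int) := by
      exact_mod_cast PySem.Int.mod_natCast s.toList.length 2
    simp only [f_py, f_py_alt, hfold, hfilt, List.nil_append, hm, hmod,
      PySem.List.slice_from_natCast, PySem.List.slice_to_natCast]
    by_cases hnil : s.toList = []
    · simp [hnil]
    · rw [if_neg hnil, if_neg hnil]
      have hlen : s.toList.length ≠ 0 := by simpa using hnil
      simp only [if_true]
      by_cases hpar : s.toList.length % 2 = 1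
      · have hAne : ¬ (s.toList.drop (s.toList.length / 2) = s.toList.take (s.toList.length / 2)) := by
          intro hEq
          have h1 := congrArg List.length hEq
          rw [List.length_drop, List.length_take] at h1
          omega
        rw [if_neg hAne, if_pos (show ((s.toList.length % 2 : Nat) : Int) = 1 by omega)]
      · rw [if_neg (show ¬ ((s.toList.length % 2 : Nat) : Int) = 1 by omega)]
        have hLh : ((s.toList.length : Int) - ((s.toList.length / 2 : Nat) : Int))
            = ((s.toList.length - s.toList.length / 2 : Nat) : Int) := by omega
        rw [hLh, PySem.List.slice_from_natCast, PySem.List.slice_to_natCast,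
          show s.toList.length - s.toList.length / 2 = s.toList.length / 2 by omega]
        have hisin : PySem.Chars.isIn ['a'] (s.toList.drop (s.toList.length / 2)) = false := by
          rw [PySem.Chars.isIn_eq_false_iff]
          exact fun hinf => ha (List.mem_of_mem_drop
            ((List.singleton_infix_iff _ _).mp hinf))
        rw [if_neg (show ¬ (PySem.Chars.isIn ['a'] (s.toList.drop (s.toList.length / 2)) = true)
          by rw [hisin]; exact Bool.false_ne_true)]
        by_cases hhalves : s.toList.take (s.toList.length / 2) = s.toList.drop (s.toList.length / 2)
        · rw [if_pos hhalves.symm, if_neg (not_not_intro hhalves)]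
        · rw [if_neg (fun hEq => hhalves hEq.symm), if_pos hhalves]
  case pos =>
    obtain ⟨p, t, hpt, hnt⟩ := exists_last_a _ ha
    have hst : (PySem.List.enumerate s.toList 0).foldl stepA ([], -1, -1)
        = (p.filter (fun c => c != 'a') ++ t, (p.length : Int),
           ((p.filter (fun c => c != 'a')).length : Int)) := by
      rw [hpt, PySem.List.enumerate_append, List.foldl_append, PySem.List.enumerate_cons,
        List.foldl_cons, foldA_no_a t hnt]
      simp [stepA, foldA_fst]
    have hfiltcs : s.toList.filter (fun c => c != 'a') = p.filter (fun c => c != 'a') ++ t := by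
      rw [hpt]
      simp [List.filter_append, filter_eq_self_of_no_a t hnt]
    have hdropt : s.toList.drop (p.length + 1) = t := by
      rw [hpt, show p ++ 'a' :: t = (p ++ ['a']) ++ t by simp, List.drop_left' (by simp)]
    simp only [f_py, f_py_alt, hst, hfiltcs]
    set F := p.filter (fun c => c != 'a') with hF
    have hq : F.length ≤ p.length := List.length_filter_le _ _
    have hL : s.toList.length = p.length + 1 + t.length := by rw [hpt]; simp; omega
    by_cases hnil : F ++ t = []
    · simp [hnil]
    · have hn : (F ++ t).length = F.length + t.length := by simp
      have hlen0 : (F ++ t).length ≠ 0 := by simpa using hnil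
      rw [if_neg hnil, if_neg hnil, if_neg (show ¬ ((p.length : Int) = -1) by omega)]
      rw [aLoop_eq _ _ _ _ _ (Int.natCast_nonneg _) hnil]
      have hmod : PySem.Int.mod (((F ++ t).length : Nat) : Int) 2 = (((F ++ t).length % 2 : Nat) : Int) := by
        exact_mod_cast PySem.Int.mod_natCast _ 2
      have hdiv : PySem.Int.floordiv (((F ++ t).length : Nat) : Int) 2 = (((F ++ t).length / 2 : Nat) : Int) := by
        exact_mod_cast PySem.Int.floordiv_natCast _ 2
      rw [hmod, hdiv]
      by_cases hpar : (F ++ t).length % 2 = 1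
      · rw [if_neg (show ¬ ((F ++ t).length % 2 = 0 ∧ ((F.length : Nat) : Int) ≤ (((F ++ t).length / 2 : Nat) : Int)
            ∧ (F ++ t).take ((F ++ t).length / 2) = (F ++ t).drop ((F ++ t).length / 2))
          by rintro ⟨h1, -, -⟩; omega)]
        rw [if_pos (show (((F ++ t).length % 2 : Nat) : Int) = 1 by omega)]
      · have hpar0 : (F ++ t).length % 2 = 0 := by omega
        rw [if_neg (show ¬ (((F ++ t).length % 2 : Nat) : Int) = 1 by omega)]
        have hLh : ((s.toList.length : Int) - (((F ++ t).length / 2 : Nat) : Int))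
            = ((s.toList.length - (F ++ t).length / 2 : Nat) : Int) := by omega
        rw [hLh, PySem.List.slice_from_natCast, PySem.List.slice_to_natCast,
          PySem.List.slice_from_natCast, PySem.List.slice_to_natCast]
        by_cases hqh : F.length ≤ (F ++ t).length / 2
        · have hdropgen : ∀ j, p.length + 1 ≤ j → s.toList.drop j = t.drop (j - (p.length + 1)) := by
            intro j hj
            rw [← hdropt, List.drop_drop]
            congr 1
            omega
          have hjge : p.length + 1 ≤ s.toList.length - (F ++ t).length / 2 := by omega
          have hisin : PySem.Chars.isIn ['a'] (s.toList.drop (s.toList.length - (F ++ t).length / 2)) = false := by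
            rw [PySem.Chars.isIn_eq_false_iff, hdropgen _ hjge]
            exact fun hinf => hnt (List.mem_of_mem_drop ((List.singleton_infix_iff _ _).mp hinf))
          rw [if_neg (show ¬ (PySem.Chars.isIn ['a']
              (s.toList.drop (s.toList.length - (F ++ t).length / 2)) = true)
            by rw [hisin]; exact Bool.false_ne_true)]
          by_cases hhalves : (F ++ t).take ((F ++ t).length / 2) = (F ++ t).drop ((F ++ t).length / 2)
          · rw [if_pos ⟨hpar0, by exact_mod_cast hqh, hhalves⟩, if_neg (not_not_intro hhalves)]
            rw [show ((p.length : Int) + (((((F ++ t).length / 2 : Nat)) : Int) - (F.length : Int) + 1))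
                = ((s.toList.length - (F ++ t).length / 2 : Nat) : Int) by omega]
            rw [PySem.List.slice_to_natCast]
          · rw [if_neg (show ¬ ((F ++ t).length % 2 = 0 ∧ ((F.length : Nat) : Int) ≤ (((F ++ t).length / 2 : Nat) : Int)
                ∧ (F ++ t).take ((F ++ t).length / 2) = (F ++ t).drop ((F ++ t).length / 2))
              by rintro ⟨-, -, h3⟩; exact hhalves h3)]
            rw [if_pos hhalves]
        · have hjle : s.toList.length - (F ++ t).length / 2 ≤ p.length := by omega
          have hmem : 'a' ∈ s.toList.drop (s.toList.length - (F ++ t).length / 2) := by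
            have h1 : s.toList.drop (s.toList.length - (F ++ t).length / 2)
                = (p ++ 'a' :: t).drop (s.toList.length - (F ++ t).length / 2) := by rw [← hpt]
            rw [h1, List.drop_append_of_le_length hjle]
            simp
          rw [if_pos (show PySem.Chars.isIn ['a']
              (s.toList.drop (s.toList.length - (F ++ t).length / 2)) = true
            by rw [PySem.Chars.isIn_iff_infix]; exact (List.singleton_infix_iff _ _).mpr hmem)]
          rw [if_neg (show ¬ ((F ++ t).length % 2 = 0 ∧ ((F.length : Nat) : Int) ≤ (((F ++ t).length / 2 : Nat) : Int)
              ∧ (F ++ t).take ((F ++ t).length / 2) = (F ++ t).drop ((F ++ t).length / 2))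
            by rintro ⟨-, h2, -⟩; exact hqh (by exact_mod_cast h2))]
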